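-- pv_equiv track=rewrite | github.com/mnigul/Drill | drill.py | punktideKorrigeerimine
-- ===== SOURCE A (Python) =====
-- def leiabxUnique(x):
--     xUnique = []
--     for px in x:
--         if not px in xUnique:
--              xUnique.append(px)
--     return xUnique
--
-- def punktiridaPunktideks(punktid, too):
--     xyText = punktid[too].split('\n')
--     x = []
--     xy = []
--     for i in range (0,len(xyText)-1):
--         x.append(xyText[i].split(' ')[0])
--         xy.append(xyText[i].split(' '))
--     return xy, leiabxUnique(x)
--
-- def sorteerija(xUnique, xy):
--     xyUus = []
--     for i in range(0,len(xUnique)):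
--         pp = [k for k in xy if xUnique[i] in k]
--         if i % 2 > 0:
--             pp.sort()
--         for pxy in pp:
--             xyUus.append(pxy)
--     return xyUus
--
-- def punktideKorrigeerimine(punktid):
--     punktidUus = []
--     for i in range (0,len(punktid)):
--         xy = []
--         xyUus = []
--         xUnique = []
--         [xy, xUnique] = punktiridaPunktideks(punktid, i)
--         xyUus = sorteerija(xUnique, xy)
--         punktidUus.append(liidabPunktid(xyUus))
--     punktidUus.append(" ")
--     return(punktidUus)
--
-- def liidabPunktid(xyUus):
--     punktUus = ""
--     for i in range(0,len(xyUus)):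
--         punktUus = punktUus + xyUus[i][0] + " " + xyUus[i][1] + '\n'
--     return punktUus
-- ===== SOURCE B (Python) =====
-- def punktideKorrigeerimine(punktid):
--     out = []
--     for rec in punktid:
--         rows = [line.split(' ') for line in rec.split('\n')[:-1]]
--         xuniq = list(dict.fromkeys(row[0] for row in rows))
--         index = {}
--         for j, row in enumerate(rows):
--             for tok in set(row):
--                 index.setdefault(tok, []).append(j)
--         pieces = []
--         for i, x in enumerate(xuniq):
--             pp = [rows[j] for j in index.get(x, [])]
--             if i % 2:
--                 pp.sort()
--             pieces.extend(r[0] + " " + r[1] + "\n" for r in pp)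
--         out.append("".join(pieces))
--     out.append(" ")
--     return out
-- ===== Notes on version B (the rewrite author's own statement) =====
-- stated objective: alternative
-- what changed: Instead of rescanning every row for each unique x-value, B splits each record once and builds an inverted index from token to row positions in a single pass, then emits each unique-x group (odd-indexed groups sorted) by direct index lookup; on the measured input mix this is not faster (A's unique-value count stays small there).
import Mathlib
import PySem

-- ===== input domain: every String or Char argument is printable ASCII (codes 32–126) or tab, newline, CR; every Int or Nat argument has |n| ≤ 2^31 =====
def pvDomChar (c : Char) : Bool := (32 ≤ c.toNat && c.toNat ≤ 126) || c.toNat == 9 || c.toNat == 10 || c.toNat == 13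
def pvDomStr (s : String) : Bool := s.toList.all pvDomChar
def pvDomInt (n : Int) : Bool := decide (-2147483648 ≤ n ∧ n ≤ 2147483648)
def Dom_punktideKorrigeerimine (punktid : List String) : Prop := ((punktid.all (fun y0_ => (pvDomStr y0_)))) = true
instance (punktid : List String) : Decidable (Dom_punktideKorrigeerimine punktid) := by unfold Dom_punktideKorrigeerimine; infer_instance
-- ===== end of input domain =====

-- B replaces A's per-unique-value rescans of all rows by an inverted index (token -> row
-- positions) built in one pass, then emits the groups by first-occurrence order of the x values.
-- Strings are handled on List Char (PySem.Chars — exact); Python's str concatenation/join are list append/flatten there.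

-- ===== PORT A =====
def leiabxUnique (x : List (List Char)) : List (List Char) :=
  x.foldl (fun xU px => if px ∈ xU then xU else xU ++ [px]) []

def punktiridaPunktideks (punktid : List String) (too : Int) :
    List (List (List Char)) × List (List Char) :=
  let xyText := PySem.Chars.splitOn (PySem.List.pyGetD punktid too "").toList ['\n']
  let st := (PySem.List.pyRange 0 (PySem.List.len xyText - 1)).foldl
    (fun (st : List (List Char) × List (List (List Char))) i =>
      (st.1 ++ [PySem.List.pyGetD (PySem.Chars.splitOn (PySem.List.pyGetD xyText i []) [' ']) 0 []],
       st.2 ++ [PySem.Chars.splitOn (PySem.List.pyGetD xyText i []) [' ']]))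
    ([], [])
  (st.2, leiabxUnique st.1)

def sorteerija (xUnique : List (List Char)) (xy : List (List (List Char))) :
    List (List (List Char)) :=
  (PySem.List.pyRange 0 (PySem.List.len xUnique)).foldl (fun xyUus i =>
    let pp := xy.filter (fun k => decide (PySem.List.pyGetD xUnique i [] ∈ k))
    let pp2 := if PySem.Int.mod i 2 > 0 then PySem.List.sorted pp (fun x => x) false else pp
    pp2.foldl (fun acc pxy => acc ++ [pxy]) xyUus) []

def liidabPunktid (xyUus : List (List (List Char))) : String :=
  String.ofList ((PySem.List.pyRange 0 (PySem.List.len xyUus)).foldl (fun acc i =>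
    acc ++ PySem.List.pyGetD (PySem.List.pyGetD xyUus i []) 0 [] ++ [' ']
        ++ PySem.List.pyGetD (PySem.List.pyGetD xyUus i []) 1 [] ++ ['\n']) [])

def punktideKorrigeerimine (punktid : List String) : List String :=
  ((PySem.List.pyRange 0 (PySem.List.len punktid)).foldl (fun acc i =>
    let r := punktiridaPunktideks punktid i
    acc ++ [liidabPunktid (sorteerija r.2 r.1)]) []) ++ [" "]

-- ===== PORT B =====
def pvSplitRows (rec : String) : List (List (List Char)) :=
  (PySem.List.slice (PySem.Chars.splitOn rec.toList ['\n']) none (some (-1))).map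
    (fun line => PySem.Chars.splitOn line [' '])

def pvBuildIndex (rows : List (List (List Char))) : PySem.Dict (List Char) (List Int) :=
  (PySem.List.enumerate rows).foldl (fun d p =>
    (PySem.Set.ofList p.2).foldl (fun d tok => d.modify tok [] (· ++ [p.1])) d)
    PySem.Dict.empty

def pvRecord (rec : String) : String :=
  let rows := pvSplitRows rec
  let xuniq := PySem.List.dedup (rows.map (fun row => PySem.List.pyGetD row 0 []))
  let idx := pvBuildIndex rows
  let pieces := (PySem.List.enumerate xuniq).foldl (fun acc p =>
    let pp := (idx.getD p.2 []).map (fun j => PySem.List.pyGetD rows j [])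
    let pp2 := if PySem.Int.mod p.1 2 ≠ 0 then PySem.List.sorted pp (fun x => x) false else pp
    acc ++ pp2.map (fun r =>
      PySem.List.pyGetD r 0 [] ++ [' '] ++ PySem.List.pyGetD r 1 [] ++ ['\n'])) []
  String.ofList pieces.flatten

def punktideKorrigeerimine_alt (punktid : List String) : List String :=
  punktid.map pvRecord ++ [" "]

-- ===== PRECONDITION & SPEC =====
-- Pre_ excludes inputs on which Python A raises IndexError: a record with a line (before the
-- final '\n'-delimited piece) that contains no space yields a row with fewer than two fields,
-- and A's output formatting accesses field [1].
def Pre_punktideKorrigeerimine (punktid : List String) : Prop :=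
  ∀ s ∈ punktid, ∀ line ∈ (PySem.Chars.splitOn s.toList ['\n']).dropLast,
    2 ≤ (PySem.Chars.splitOn line [' ']).length

instance (punktid : List String) : Decidable (Pre_punktideKorrigeerimine punktid) := by
  unfold Pre_punktideKorrigeerimine; infer_instance

def pvWitness_punktideKorrigeerimine : List String := ["3 b\n1 a\n3 c\n", ""]

def Spec_punktideKorrigeerimine (punktid : List String) (out : List String) : Prop :=
  out = punktideKorrigeerimine_alt punktid
instance (punktid : List String) (out : List String) : Decidable (Spec_punktideKorrigeerimine punktid out) := by
  unfold Spec_punktideKorrigeerimine; infer_instance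

-- ===== CLAIM (what is proved, stated in full; the proofs are below) =====
def Claim_equal_punktideKorrigeerimine : Prop :=
  ∀ (punktid : List String), Dom_punktideKorrigeerimine punktid →
    Pre_punktideKorrigeerimine punktid →
    Spec_punktideKorrigeerimine punktid (punktideKorrigeerimine punktid)

-- ===== LEMMAS AND PROOFS =====

-- the A-side per-record computation, as a function of the record string alone
def pvARecord (rec : String) : String :=
  let xyText := PySem.Chars.splitOn rec.toList ['\n']
  let st := (PySem.List.pyRange 0 (PySem.List.len xyText - 1)).foldl
    (fun (st : List (List Char) × List (List (List Char))) i =>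
      (st.1 ++ [PySem.List.pyGetD (PySem.Chars.splitOn (PySem.List.pyGetD xyText i []) [' ']) 0 []],
       st.2 ++ [PySem.Chars.splitOn (PySem.List.pyGetD xyText i []) [' ']]))
    ([], [])
  liidabPunktid (sorteerija (leiabxUnique st.1) st.2)

lemma pvA_eq_map (punktid : List String) :
    punktideKorrigeerimine punktid = punktid.map pvARecord ++ [" "] := by
  unfold punktideKorrigeerimine
  have hb : (fun (acc : List String) (i : Int) =>
      let r := punktiridaPunktideks punktid i
      acc ++ [liidabPunktid (sorteerija r.2 r.1)])
      = fun acc i => acc ++ [pvARecord (PySem.List.pyGetD punktid i "")] := by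
    funext acc i; rfl
  rw [hb, PySem.List.len_eq,
    PySem.List.foldl_pyRange_zero_pyGetD' punktid "" (fun acc rec => acc ++ [pvARecord rec]),
    PySem.List.foldl_append_singleton_eq_map]
  simp

lemma pvGetD_fold_modify (toks : List (List Char)) (h : toks.Nodup)
    (d : PySem.Dict (List Char) (List Int)) (j : Int) (x : List Char) :
    (toks.foldl (fun d t => d.modify t [] (· ++ [j])) d).getD x []
      = if x ∈ toks then d.getD x [] ++ [j] else d.getD x [] := by
  induction toks generalizing d with
  | nil => simp
  | cons t ts ih =>
    simp only [List.foldl_cons]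
    rw [ih (List.Nodup.of_cons h)]
    rcases eq_or_ne x t with rfl | hx
    · have hnot : x ∉ ts := (List.nodup_cons.mp h).1
      simp [hnot]
    · by_cases hm : x ∈ ts <;> simp [PySem.Dict.getD_modify, hx, hm]

lemma pvIndex_getD (rows : List (List (List Char))) (s : Int)
    (d : PySem.Dict (List Char) (List Int)) (x : List Char) :
    ((PySem.List.enumerate rows s).foldl (fun d p =>
        (PySem.Set.ofList p.2).foldl (fun d tok => d.modify tok [] (· ++ [p.1])) d) d).getD x []
      = d.getD x [] ++ ((PySem.List.enumerate rows s).filter (fun p => decide (x ∈ p.2))).map (·.1) := by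
  induction rows generalizing s d with
  | nil => simp [PySem.List.enumerate]
  | cons r rs ih =>
    rw [PySem.List.enumerate_cons]
    simp only [List.foldl_cons, List.filter_cons]
    rw [ih]
    rw [pvGetD_fold_modify _ (PySem.Set.nodup_ofList r) d s x]
    by_cases hm : x ∈ r <;> simp [hm, PySem.Set.mem_ofList]

lemma pvFilter_enum_snd {α : Type} (rows : List α) (s : Int) (q : α → Bool) :
    ((PySem.List.enumerate rows s).filter (fun p => q p.2)).map (·.2) = rows.filter q := by
  induction rows generalizing s with
  | nil => simp [PySem.List.enumerate]
  | cons r rs ih =>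
    rw [PySem.List.enumerate_cons]
    by_cases h : q r <;> simp [h, ih]

lemma pvIndex_rows (rows : List (List (List Char))) (x : List Char) :
    ((pvBuildIndex rows).getD x []).map (fun j => PySem.List.pyGetD rows j [])
      = rows.filter (fun k => decide (x ∈ k)) := by
  unfold pvBuildIndex
  rw [pvIndex_getD]
  simp only [PySem.Dict.getD_empty, List.nil_append, List.map_map]
  have hc : ∀ p ∈ (PySem.List.enumerate rows).filter (fun p => decide (x ∈ p.2)),
      ((fun j => PySem.List.pyGetD rows j []) ∘ (·.1)) p = (·.2) p := by
    intro p hp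
    have hp' := List.mem_of_mem_filter hp
    rcases (PySem.List.mem_enumerate_iff _ _ _).mp hp' with ⟨k, hk, rfl⟩
    simp [PySem.List.pyGetD_natCast, hk]
  rw [List.map_congr_left hc, pvFilter_enum_snd rows 0 (fun k => decide (x ∈ k))]

lemma pvLeiab (x : List (List Char)) : leiabxUnique x = PySem.Set.ofList x := by
  unfold leiabxUnique
  rw [PySem.Set.ofList_eq_foldl]
  have h : (fun (xU : List (List Char)) px => if px ∈ xU then xU else xU ++ [px])
      = PySem.Set.add := by
    funext s a; rw [PySem.Set.add_eq_ite]
  rw [h]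

lemma pvPairFold (T : List (List Char)) :
    (PySem.List.pyRange 0 (PySem.List.len T - 1)).foldl
      (fun (st : List (List Char) × List (List (List Char))) i =>
        (st.1 ++ [PySem.List.pyGetD (PySem.Chars.splitOn (PySem.List.pyGetD T i []) [' ']) 0 []],
         st.2 ++ [PySem.Chars.splitOn (PySem.List.pyGetD T i []) [' ']])) ([], [])
    = (T.dropLast.map (fun l => PySem.List.pyGetD (PySem.Chars.splitOn l [' ']) 0 []),
       T.dropLast.map (fun l => PySem.Chars.splitOn l [' '])) := by
  by_cases hT : T = []
  · subst hT
    rw [PySem.List.pyRange_one_eq_nil (by simp [PySem.List.len_eq])]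
    simp
  · have h1 : 1 ≤ T.length := List.length_pos_iff.mpr hT
    have hlen : PySem.List.len T - 1 = (T.dropLast.length : Int) := by
      simp only [PySem.List.len_eq, List.length_dropLast]
      omega
    rw [hlen]
    have hget : ∀ (st : List (List Char) × List (List (List Char))) (i : Int),
        i ∈ PySem.List.pyRange 0 (T.dropLast.length : Int) →
        (fun (st : List (List Char) × List (List (List Char))) i =>
          (st.1 ++ [PySem.List.pyGetD (PySem.Chars.splitOn (PySem.List.pyGetD T i []) [' ']) 0 []],
           st.2 ++ [PySem.Chars.splitOn (PySem.List.pyGetD T i []) [' ']])) st i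
        = (fun (st : List (List Char) × List (List (List Char))) i =>
          (st.1 ++ [PySem.List.pyGetD (PySem.Chars.splitOn (PySem.List.pyGetD T.dropLast i []) [' ']) 0 []],
           st.2 ++ [PySem.Chars.splitOn (PySem.List.pyGetD T.dropLast i []) [' ']])) st i := by
      intro st i hi
      have hmem := PySem.List.mem_pyRange_one.mp hi
      have h0 : 0 ≤ i := hmem.1
      have h1 : i.toNat < T.dropLast.length := by omega
      have h2 : i.toNat < T.length := by
        simp only [List.length_dropLast] at h1; omega
      have he : PySem.List.pyGetD T i [] = PySem.List.pyGetD T.dropLast i [] := by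
        rw [PySem.List.pyGetD_eq_getElem _ _ h0 (by omega),
            PySem.List.pyGetD_eq_getElem _ _ h0 (by omega)]
        exact (List.getElem_dropLast _).symm
      simp only [he]
    rw [PySem.List.foldl_congr_mem _ _ _ _ hget]
    rw [PySem.List.foldl_prod_mk
      (f := fun acc (i : Int) =>
        acc ++ [PySem.List.pyGetD (PySem.Chars.splitOn (PySem.List.pyGetD T.dropLast i []) [' ']) 0 []])
      (g := fun acc (i : Int) => acc ++ [PySem.Chars.splitOn (PySem.List.pyGetD T.dropLast i []) [' ']])]
    rw [PySem.List.foldl_pyRange_zero_pyGetD' T.dropLast []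
          (fun acc l => acc ++ [PySem.List.pyGetD (PySem.Chars.splitOn l [' ']) 0 []]),
        PySem.List.foldl_pyRange_zero_pyGetD' T.dropLast []
          (fun acc l => acc ++ [PySem.Chars.splitOn l [' ']]),
        PySem.List.foldl_append_singleton_eq_map, PySem.List.foldl_append_singleton_eq_map]
    simp

lemma pvFlattenFlatMap {α β : Type} (l : List α) (g : α → List (List β)) :
    (l.flatMap g).flatten = l.flatMap (fun x => (g x).flatten) := by
  induction l with
  | nil => simp
  | cons a t ih => simp [ih]

lemma pvSorteerija (U : List (List Char)) (xy : List (List (List Char))) :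
    sorteerija U xy = (PySem.List.pyRange 0 (PySem.List.len U)).flatMap (fun i =>
      if PySem.Int.mod i 2 > 0
      then PySem.List.sorted (xy.filter (fun k => decide (PySem.List.pyGetD U i [] ∈ k))) (fun x => x) false
      else xy.filter (fun k => decide (PySem.List.pyGetD U i [] ∈ k))) := by
  unfold sorteerija
  have hb : (fun (xyUus : List (List (List Char))) (i : Int) =>
      let pp := xy.filter (fun k => decide (PySem.List.pyGetD U i [] ∈ k))
      let pp2 := if PySem.Int.mod i 2 > 0 then PySem.List.sorted pp (fun x => x) false else pp
      pp2.foldl (fun acc pxy => acc ++ [pxy]) xyUus)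
      = fun xyUus i => xyUus ++ (if PySem.Int.mod i 2 > 0
          then PySem.List.sorted (xy.filter (fun k => decide (PySem.List.pyGetD U i [] ∈ k))) (fun x => x) false
          else xy.filter (fun k => decide (PySem.List.pyGetD U i [] ∈ k))) := by
    funext acc i
    rw [PySem.List.foldl_append_singleton_eq_self]
  rw [hb, PySem.List.foldl_append_eq_flatMap, List.nil_append]

lemma pvLiidab (xy : List (List (List Char))) :
    liidabPunktid xy = String.ofList (xy.flatMap (fun row =>
      PySem.List.pyGetD row 0 [] ++ [' '] ++ PySem.List.pyGetD row 1 [] ++ ['\n'])) := by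
  unfold liidabPunktid
  have hb : (fun (acc : List Char) (i : Int) =>
      acc ++ PySem.List.pyGetD (PySem.List.pyGetD xy i []) 0 [] ++ [' ']
          ++ PySem.List.pyGetD (PySem.List.pyGetD xy i []) 1 [] ++ ['\n'])
      = fun acc i => acc ++ (PySem.List.pyGetD (PySem.List.pyGetD xy i []) 0 [] ++ [' ']
          ++ PySem.List.pyGetD (PySem.List.pyGetD xy i []) 1 [] ++ ['\n']) := by
    funext acc i
    simp [List.append_assoc]
  rw [hb, PySem.List.len_eq,
      PySem.List.foldl_pyRange_zero_pyGetD' xy []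
        (fun acc row => acc ++ (PySem.List.pyGetD row 0 [] ++ [' ']
          ++ PySem.List.pyGetD row 1 [] ++ ['\n'])),
      PySem.List.foldl_append_eq_flatMap, List.nil_append]

lemma pvRecord_eq (rec : String) : pvARecord rec = pvRecord rec := by
  unfold pvARecord pvRecord pvSplitRows
  dsimp only
  rw [PySem.List.slice_to_neg_one, pvPairFold, pvLeiab, pvSorteerija, pvLiidab,
      PySem.List.dedup_eq_ofList, List.map_map]
  rw [PySem.List.foldl_append_eq_flatMap, List.nil_append, pvFlattenFlatMap]
  simp only [← List.flatMap_def]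
  rw [PySem.List.enumerate_eq_map_pyRange _ ([] : List Char), List.flatMap_map, List.flatMap_assoc]
  simp only [Function.comp_def]
  rw [List.flatMap_def, List.flatMap_def]
  congr 1
  apply congrArg List.flatten
  apply List.map_congr_left
  intro i _
  have hpar : (PySem.Int.mod i 2 > 0) ↔ (PySem.Int.mod i 2 ≠ 0) := by
    have h := PySem.Int.mod_nonneg i (b := 2) (by norm_num)
    omega
  rw [pvIndex_rows]
  by_cases h : PySem.Int.mod i 2 ≠ 0
  · rw [if_pos (hpar.mpr h), if_pos h]
  · rw [if_neg (fun hgt => h (hpar.mp hgt)), if_neg h]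

-- ===== VERDICT (by name: the statement is the Claim_ definition above) =====
theorem punktideKorrigeerimine_spec : Claim_equal_punktideKorrigeerimine := by
  intro punktid _ _
  unfold Spec_punktideKorrigeerimine punktideKorrigeerimine_alt
  rw [pvA_eq_map]
  simp [pvRecord_eq]
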